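-- pv_equiv track=rewrite | github.com/pndang/CSE158 | midterm/midterm.py | rates
-- ===== SOURCE A (Python) =====
-- def rates(predictions, y):
--     truePos = 0
--     numPos = 0
--     trueNeg = 0
--     numNeg = 0
--     for i in range(len(y)):
--         if y[i]:
--             numPos += 1
--         if predictions[i] and y[i]:
--             truePos += 1
--         if not y[i]:
--             numNeg += 1
--         if not predictions[i] and not y[i]:
--             trueNeg += 1
--     TP = truePos
--     FP = numNeg-trueNeg
--     TN = trueNeg
--     FN = numPos-truePos
--     return TP, TN, FP, FN
-- ===== SOURCE B (Python) =====
-- def rates(predictions, y):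
--     pairs = [(bool(predictions[i]), bool(y[i])) for i in range(len(y))]
--     TP = pairs.count((True, True))
--     TN = pairs.count((False, False))
--     FP = pairs.count((True, False))
--     FN = pairs.count((False, True))
--     return TP, TN, FP, FN
-- ===== Notes on version B (the rewrite author's own statement) =====
-- stated objective: simpler
-- what changed: Replaces A's single-pass loop maintaining four marginal/diagonal accumulators with post-loop subtractions by a staged decomposition: one indexing pass materializes the (prediction, label) pair list, then each confusion-matrix cell is read off directly as a whole-list pairs.count query, with no running state and no arithmetic.
import Mathlib
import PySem

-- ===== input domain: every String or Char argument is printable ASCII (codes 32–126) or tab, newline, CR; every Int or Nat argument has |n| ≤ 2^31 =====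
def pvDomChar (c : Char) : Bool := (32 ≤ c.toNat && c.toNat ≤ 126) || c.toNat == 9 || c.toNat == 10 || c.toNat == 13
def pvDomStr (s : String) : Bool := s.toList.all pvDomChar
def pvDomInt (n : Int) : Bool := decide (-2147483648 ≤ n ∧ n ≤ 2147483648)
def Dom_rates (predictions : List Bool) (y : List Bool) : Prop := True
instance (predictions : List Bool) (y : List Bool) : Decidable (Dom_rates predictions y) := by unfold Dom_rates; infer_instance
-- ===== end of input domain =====

-- B replaces A's running four-accumulator loop (with post-loop subtractions) by a staged
-- decomposition: materialize the (prediction,label) pair list, then read each cell as a count query.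


-- ===== PORT A =====
def rates (predictions : List Bool) (y : List Bool) : Int × Int × Int × Int :=
  let s := (PySem.List.pyRange 0 (y.length : Int) 1).foldl
    (fun (s : Int × Int × Int × Int) i =>
      let yi := PySem.List.pyGetD y i false
      let pi := PySem.List.pyGetD predictions i false
      let np := if yi then s.2.1 + 1 else s.2.1
      let tp := if pi && yi then s.1 + 1 else s.1
      let nn := if !yi then s.2.2.2 + 1 else s.2.2.2
      let tn := if !pi && !yi then s.2.2.1 + 1 else s.2.2.1
      (tp, np, tn, nn))
    (0, 0, 0, 0)
  (s.1, s.2.2.1, s.2.2.2 - s.2.2.1, s.2.1 - s.1)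

-- ===== PORT B =====
def rates_alt (predictions : List Bool) (y : List Bool) : Int × Int × Int × Int :=
  let pairs := (PySem.List.pyRange 0 (y.length : Int) 1).map
    (fun i => (PySem.List.pyGetD predictions i false, PySem.List.pyGetD y i false))
  ((PySem.List.count pairs (true, true) : Int),
   (PySem.List.count pairs (false, false) : Int),
   (PySem.List.count pairs (true, false) : Int),
   (PySem.List.count pairs (false, true) : Int))

-- ===== PRECONDITION & SPEC =====
-- Pre_ excludes exactly the inputs where A raises IndexError (predictions shorter than y).
def Pre_rates (predictions : List Bool) (y : List Bool) : Prop := y.length ≤ predictions.length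
instance (predictions : List Bool) (y : List Bool) : Decidable (Pre_rates predictions y) := by unfold Pre_rates; infer_instance
def pvWitness_rates : List Bool × List Bool := ([true, false, true], [true, true, false])

def Spec_rates (predictions : List Bool) (y : List Bool) (out : Int × Int × Int × Int) : Prop := out = rates_alt predictions y
instance (predictions : List Bool) (y : List Bool) (out : Int × Int × Int × Int) : Decidable (Spec_rates predictions y out) := by unfold Spec_rates; infer_instance

-- ===== CLAIM (what is proved, stated in full; the proofs are below) =====
def Claim_equal_rates : Prop := ∀ (predictions : List Bool) (y : List Bool), Dom_rates predictions y → Pre_rates predictions y → Spec_rates predictions y (rates predictions y)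

-- ===== LEMMAS AND PROOFS =====

-- A's loop, generalized over the index list: the four accumulators are offsets plus
-- counts of the key pairs produced so far.
theorem ratesA_foldl (predictions y : List Bool) (L : List Int) (tp np tn nn : Int) :
    L.foldl
      (fun (s : Int × Int × Int × Int) i =>
        let yi := PySem.List.pyGetD y i false
        let pi := PySem.List.pyGetD predictions i false
        let np := if yi then s.2.1 + 1 else s.2.1
        let tp := if pi && yi then s.1 + 1 else s.1
        let nn := if !yi then s.2.2.2 + 1 else s.2.2.2
        let tn := if !pi && !yi then s.2.2.1 + 1 else s.2.2.1
        (tp, np, tn, nn))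
      (tp, np, tn, nn)
    = (let K := L.map (fun i => (PySem.List.pyGetD predictions i false, PySem.List.pyGetD y i false))
       (tp + (K.count (true, true) : Int),
        np + (K.count (true, true) : Int) + (K.count (false, true) : Int),
        tn + (K.count (false, false) : Int),
        nn + (K.count (false, false) : Int) + (K.count (true, false) : Int))) := by
  induction L generalizing tp np tn nn with
  | nil => simp
  | cons a L ih =>
    simp only [List.foldl_cons, List.map_cons, List.count_cons, ih]
    rcases hp : PySem.List.pyGetD predictions a false <;>
      rcases hy : PySem.List.pyGetD y a false <;>
      simp [Prod.ext_iff] <;> omega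

theorem rates_eq (predictions y : List Bool) :
    rates predictions y = rates_alt predictions y := by
  unfold rates rates_alt
  simp only [ratesA_foldl, PySem.List.count_eq, Prod.ext_iff]
  exact ⟨by ring, by ring, by ring, by ring⟩

-- ===== VERDICT (by name: the statement is the Claim_ definition above) =====
theorem rates_spec : Claim_equal_rates := by
  intro predictions y _ _
  unfold Spec_rates
  exact rates_eq predictions y
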